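-- pv_equiv track=rewrite | github.com/uvsq22306875/2048-Peguy-Nguyen-Le-Aitchikh | 2048 compétitive.py | compteur_des_additions_possibles
-- ===== SOURCE A (Python) =====
-- def compteur_des_additions_possibles(m):
--     compteur = 0
--     m_temp = [ligne[:] for ligne in m]  #Copie de la grille
--
--     # On décale tous les éléments vers la gauche pour éliminer les zéros.
--     for _ in range(2):
--         for ligne in range(4):
--             for colonne in range(3):
--                 if m_temp[ligne][colonne] == 0:
--                     for k in range(colonne, 3):
--                         m_temp[ligne][k] = m_temp[ligne][k + 1]
--                     m_temp[ligne][3] = 0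
--     # On fusionne les éléments égaux adjacents.
--     for ligne in range(4):
--         for colonne in range(3):
--             if m_temp[ligne][colonne] == m_temp[ligne][colonne + 1] :
--                 compteur += 1
--
--     # On décale tous les éléments vers la droite pour éliminer les zéros.
--     for _ in range(2):
--         for ligne in range(4):
--             for colonne in range(3, 0, -1):
--                 if m_temp[ligne][colonne] == 0:
--                     for k in range(colonne, 0, -1):
--                         m_temp[ligne][k] = m_temp[ligne][k - 1]
--                     m_temp[ligne][0] = 0
--     # On fusionne les éléments égaux adjacents.
--     for ligne in range(4):
--         for colonne in range(3, 0, -1):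
--             if m_temp[ligne][colonne] == m_temp[ligne][colonne - 1]:
--                 compteur += 1
--
--     # On décale tous les éléments vers le haut pour éliminer les zéros.
--     for _ in range(2):
--         for colonne in range(4):
--             for ligne in range(3):
--                 if m_temp[ligne][colonne] == 0:
--                     for k in range(ligne, 3):
--                         m_temp[k][colonne] = m_temp[k + 1][colonne]
--                     m_temp[3][colonne] = 0
--     # On fusionne les éléments égaux adjacents.
--     for colonne in range(4):
--         for ligne in range(3):
--             if m_temp[ligne][colonne] == m_temp[ligne + 1][colonne]:
--                 compteur += 1
--
--     # On décale tous les éléments vers le bas pour éliminer les zéros.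
--     for _ in range(2):
--         for colonne in range(4):
--             for ligne in range(3, 0, -1):
--                 if m_temp[ligne][colonne] == 0:
--                     for k in range(ligne, 0, -1):
--                         m_temp[k][colonne] = m_temp[k - 1][colonne]
--                     m_temp[0][colonne] = 0
--     # On fusionne les éléments égaux adjacents.
--     for colonne in range(4):
--         for ligne in range(3, 0, -1):
--             if m_temp[ligne][colonne] == m_temp[ligne - 1][colonne]:
--                 compteur += 1
--
--     return compteur
-- ===== SOURCE B (Python) =====
-- def compact(line):
--     return [v for v in line if v != 0]
--
--
-- def count_pairs(s):
--     return sum(1 for i in range(3) if s[i] == s[i + 1])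
--
--
-- def compteur_des_additions_possibles(m):
--     total = 0
--     rows2 = []
--     for i in range(4):
--         row = [m[i][j] for j in range(4)]
--         c = compact(row)
--         pad = [0] * (4 - len(c))
--         total += count_pairs(c + pad) + count_pairs(pad + c)
--         rows2.append(pad + c)
--     for j in range(4):
--         col = [r[j] for r in rows2]
--         c = compact(col)
--         pad = [0] * (4 - len(c))
--         total += count_pairs(c + pad) + count_pairs(pad + c)
--     return total
-- ===== Notes on version B (the rewrite author's own statement) =====
-- stated objective: simpler
-- what changed: Replaces the eight in-place shift/merge sweeps over a mutated copy of the grid by a single pass that compacts each row once (filter out zeros), counts adjacent equal pairs on the right- and left-padded row, then transposes the padded rows and does the same per column; no grid mutation or repeated shifting loops remain.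
import Mathlib
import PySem

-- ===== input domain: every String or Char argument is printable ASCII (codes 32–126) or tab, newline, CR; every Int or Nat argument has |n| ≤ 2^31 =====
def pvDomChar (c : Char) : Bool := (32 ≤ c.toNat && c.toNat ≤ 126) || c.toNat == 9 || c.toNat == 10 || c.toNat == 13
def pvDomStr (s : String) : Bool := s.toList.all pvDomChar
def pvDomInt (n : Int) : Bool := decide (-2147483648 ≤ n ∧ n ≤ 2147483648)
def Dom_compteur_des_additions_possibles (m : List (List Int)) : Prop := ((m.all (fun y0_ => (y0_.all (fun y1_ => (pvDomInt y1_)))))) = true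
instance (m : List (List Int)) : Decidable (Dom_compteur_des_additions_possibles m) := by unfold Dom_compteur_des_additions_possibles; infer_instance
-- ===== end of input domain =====

-- B replaces A's eight in-place shift/merge sweeps by compacting each row/column once and
-- counting adjacent equal pairs on the padded line (simpler decomposition; same return value).


-- ===== PORT A =====
-- grid cell read/write; exact for the in-range indices A uses on inputs satisfying Pre_
def gget (g : List (List Int)) (i j : Nat) : Int := (g.getD i []).getD j 0
def gset (g : List (List Int)) (i j : Nat) (v : Int) : List (List Int) :=
  g.set i ((g.getD i []).set j v)

def shiftLstep (g : List (List Int)) (l c : Nat) : List (List Int) :=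
  if gget g l c = 0 then
    gset ((List.range' c (3 - c)).foldl (fun g k => gset g l k (gget g l (k + 1))) g) l 3 0
  else g

def passL (g : List (List Int)) : List (List Int) :=
  [0, 1, 2, 3].foldl (fun g l => [0, 1, 2].foldl (fun g c => shiftLstep g l c) g) g

def countL (g : List (List Int)) : Int :=
  [0, 1, 2, 3].foldl (fun a l =>
    [0, 1, 2].foldl (fun (a : Int) c => if gget g l c = gget g l (c + 1) then a + 1 else a) a) 0

def shiftRstep (g : List (List Int)) (l c : Nat) : List (List Int) :=
  if gget g l c = 0 then
    gset (((List.range' 1 c).reverse).foldl (fun g k => gset g l k (gget g l (k - 1))) g) l 0 0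
  else g

def passR (g : List (List Int)) : List (List Int) :=
  [0, 1, 2, 3].foldl (fun g l => [3, 2, 1].foldl (fun g c => shiftRstep g l c) g) g

def countR (g : List (List Int)) : Int :=
  [0, 1, 2, 3].foldl (fun a l =>
    [3, 2, 1].foldl (fun (a : Int) c => if gget g l c = gget g l (c - 1) then a + 1 else a) a) 0

def shiftUstep (g : List (List Int)) (l c : Nat) : List (List Int) :=
  if gget g l c = 0 then
    gset ((List.range' l (3 - l)).foldl (fun g k => gset g k c (gget g (k + 1) c)) g) 3 c 0
  else g

def passU (g : List (List Int)) : List (List Int) :=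
  [0, 1, 2, 3].foldl (fun g c => [0, 1, 2].foldl (fun g l => shiftUstep g l c) g) g

def countU (g : List (List Int)) : Int :=
  [0, 1, 2, 3].foldl (fun a c =>
    [0, 1, 2].foldl (fun (a : Int) l => if gget g l c = gget g (l + 1) c then a + 1 else a) a) 0

def shiftDstep (g : List (List Int)) (l c : Nat) : List (List Int) :=
  if gget g l c = 0 then
    gset (((List.range' 1 l).reverse).foldl (fun g k => gset g k c (gget g (k - 1) c)) g) 0 c 0
  else g

def passD (g : List (List Int)) : List (List Int) :=
  [0, 1, 2, 3].foldl (fun g c => [3, 2, 1].foldl (fun g l => shiftDstep g l c) g) g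

def countD (g : List (List Int)) : Int :=
  [0, 1, 2, 3].foldl (fun a c =>
    [3, 2, 1].foldl (fun (a : Int) l => if gget g l c = gget g (l - 1) c then a + 1 else a) a) 0

def compteur_des_additions_possibles (m : List (List Int)) : Int :=
  -- m_temp = [ligne[:] for ligne in m]: a row-by-row copy, the identity on immutable lists
  let mtemp := m
  let g1 := passL (passL mtemp)
  let c1 := countL g1
  let g2 := passR (passR g1)
  let c2 := countR g2
  let g3 := passU (passU g2)
  let c3 := countU g3
  let g4 := passD (passD g3)
  let c4 := countD g4
  c1 + c2 + c3 + c4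

-- ===== PORT B =====
def pyCompact (line : List Int) : List Int := line.filter (fun v => v != 0)

def countPairs (s : List Int) : Int :=
  [0, 1, 2].foldl (fun (a : Int) i => if s.getD i 0 = s.getD (i + 1) 0 then a + 1 else a) 0

def compteur_des_additions_possibles_alt (m : List (List Int)) : Int :=
  let step1 := [0, 1, 2, 3].foldl
    (fun (acc : Int × List (List Int)) i =>
      let row := [(m.getD i []).getD 0 0, (m.getD i []).getD 1 0,
                  (m.getD i []).getD 2 0, (m.getD i []).getD 3 0]
      let c := pyCompact row
      let pad : List Int := List.replicate (4 - c.length) 0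
      (acc.1 + countPairs (c ++ pad) + countPairs (pad ++ c), acc.2 ++ [pad ++ c]))
    (0, [])
  [0, 1, 2, 3].foldl
    (fun (a : Int) j =>
      let col := step1.2.map (fun r => r.getD j 0)
      let c := pyCompact col
      let pad : List Int := List.replicate (4 - c.length) 0
      a + countPairs (c ++ pad) + countPairs (pad ++ c))
    step1.1

-- ===== PRECONDITION & SPEC =====
-- A indexes rows 0..3 and columns 0..3 unconditionally: it raises IndexError iff the grid has
-- fewer than 4 rows or one of the first 4 rows has fewer than 4 entries.
def Pre_compteur_des_additions_possibles (m : List (List Int)) : Prop :=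
  4 ≤ m.length ∧ ∀ r ∈ m.take 4, 4 ≤ r.length
instance (m : List (List Int)) : Decidable (Pre_compteur_des_additions_possibles m) := by
  unfold Pre_compteur_des_additions_possibles; infer_instance

def pvWitness_compteur_des_additions_possibles : List (List Int) :=
  [[2, 2, 0, 0], [0, 4, 4, 0], [0, 0, 2, 2], [8, 0, 0, 8]]

def Spec_compteur_des_additions_possibles (m : List (List Int)) (out : Int) : Prop := out = compteur_des_additions_possibles_alt m
instance (m : List (List Int)) (out : Int) : Decidable (Spec_compteur_des_additions_possibles m out) := by unfold Spec_compteur_des_additions_possibles; infer_instance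

-- ===== CLAIM (what is proved, stated in full; the proofs are below) =====
def Claim_equal_compteur_des_additions_possibles : Prop := ∀ (m : List (List Int)), Dom_compteur_des_additions_possibles m → Pre_compteur_des_additions_possibles m → Spec_compteur_des_additions_possibles m (compteur_des_additions_possibles m)

-- ===== LEMMAS AND PROOFS =====

-- row-level single left/right compaction sweeps (the body of A's sweeps, restricted to one row)
def stepL (r : List Int) (c : Nat) : List Int :=
  if r.getD c 0 = 0 then ((List.range' c (3 - c)).foldl (fun r k => r.set k (r.getD (k + 1) 0)) r).set 3 0 else r

def pL (r : List Int) : List Int := [0, 1, 2].foldl stepL r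

def stepR (r : List Int) (c : Nat) : List Int :=
  if r.getD c 0 = 0 then (((List.range' 1 c).reverse).foldl (fun r k => r.set k (r.getD (k - 1) 0)) r).set 0 0 else r

def pR (r : List Int) : List Int := [3, 2, 1].foldl stepR r

lemma getD_set_self {α : Type} (l : List α) (i : Nat) (h : i < l.length) (x d : α) :
    (l.set i x).getD i d = x := by simp [List.getD, h]

lemma set_getD_self {α : Type} (l : List α) (i : Nat) (h : i < l.length) (d : α) :
    l.set i (l.getD i d) = l := by
  rw [List.getD_eq_getElem _ _ h]; exact List.set_getElem_self ..

lemma foldl_gset_row (i : Nat) (F : List Int → Nat → List Int) (ks : List Nat) :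
    ∀ (g : List (List Int)), i < g.length →
      ks.foldl (fun g k => g.set i (F (g.getD i []) k)) g = g.set i (ks.foldl F (g.getD i [])) := by
  induction ks with
  | nil => intro g h; exact (set_getD_self g i h []).symm
  | cons k ks ih =>
      intro g h
      simp only [List.foldl_cons]
      rw [ih _ (by simpa using h), getD_set_self _ _ h, List.set_set]

lemma foldl_set_length (f : List Int → Nat → Int) (ks : List Nat) :
    ∀ (r : List Int), (ks.foldl (fun r k => r.set k (f r k)) r).length = r.length := by
  induction ks with
  | nil => intro r; rfl
  | cons k ks ih => intro r; simp [List.foldl_cons, ih, List.length_set]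

lemma stepL_length (r : List Int) (c : Nat) : (stepL r c).length = r.length := by
  unfold stepL; split_ifs with h
  · rw [List.length_set]; exact foldl_set_length (fun r k => r.getD (k + 1) 0) _ r
  · rfl

lemma stepR_length (r : List Int) (c : Nat) : (stepR r c).length = r.length := by
  unfold stepR; split_ifs with h
  · rw [List.length_set]; exact foldl_set_length (fun r k => r.getD (k - 1) 0) _ r
  · rfl

lemma pL_length (r : List Int) : (pL r).length = r.length := by
  simp [pL, List.foldl, stepL_length]

lemma pR_length (r : List Int) : (pR r).length = r.length := by
  simp [pR, List.foldl, stepR_length]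

lemma exists_four (l : List Int) (h : l.length = 4) : ∃ a b c d, l = [a, b, c, d] := by
  rcases l with _ | ⟨a, _ | ⟨b, _ | ⟨c, _ | ⟨d, _ | ⟨e, l⟩⟩⟩⟩⟩ <;>
    first
    | exact ⟨_, _, _, _, rfl⟩
    | simp at h

lemma four_getD (l : List Int) (h : l.length = 4) :
    [l.getD 0 0, l.getD 1 0, l.getD 2 0, l.getD 3 0] = l := by
  obtain ⟨a, b, c, d, rfl⟩ := exists_four l h; rfl

lemma shiftLstep_eq (g : List (List Int)) (l c : Nat) (h : l < g.length) :
    shiftLstep g l c = g.set l (stepL (g.getD l []) c) := by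
  unfold shiftLstep stepL gget gset
  by_cases hc : (g.getD l []).getD c 0 = 0
  · simp only [hc, if_pos]
    rw [foldl_gset_row l (fun r k => r.set k (r.getD (k + 1) 0)) _ g h]
    rw [getD_set_self _ _ h, List.set_set]
  · simp only [hc, if_neg, not_false_iff]
    exact (set_getD_self g l h []).symm

lemma shiftRstep_eq (g : List (List Int)) (l c : Nat) (h : l < g.length) :
    shiftRstep g l c = g.set l (stepR (g.getD l []) c) := by
  unfold shiftRstep stepR gget gset
  by_cases hc : (g.getD l []).getD c 0 = 0
  · simp only [hc, if_pos]
    rw [foldl_gset_row l (fun r k => r.set k (r.getD (k - 1) 0)) _ g h]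
    rw [getD_set_self _ _ h, List.set_set]
  · simp only [hc, if_neg, not_false_iff]
    exact (set_getD_self g l h []).symm

lemma rowsweepL (g : List (List Int)) (l : Nat) (h : l < g.length) :
    shiftLstep (shiftLstep (shiftLstep g l 0) l 1) l 2 = g.set l (pL (g.getD l [])) := by
  rw [shiftLstep_eq g l 0 h, shiftLstep_eq _ l 1 (by simpa using h),
    getD_set_self _ _ h, List.set_set,
    shiftLstep_eq _ l 2 (by simpa using h), getD_set_self _ _ h, List.set_set]
  rfl

lemma rowsweepR (g : List (List Int)) (l : Nat) (h : l < g.length) :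
    shiftRstep (shiftRstep (shiftRstep g l 3) l 2) l 1 = g.set l (pR (g.getD l [])) := by
  rw [shiftRstep_eq g l 3 h, shiftRstep_eq _ l 2 (by simpa using h),
    getD_set_self _ _ h, List.set_set,
    shiftRstep_eq _ l 1 (by simpa using h), getD_set_self _ _ h, List.set_set]
  rfl

lemma passL_eq (r0 r1 r2 r3 : List Int) (tm : List (List Int)) :
    passL (r0 :: r1 :: r2 :: r3 :: tm) = pL r0 :: pL r1 :: pL r2 :: pL r3 :: tm := by
  unfold passL
  simp only [List.foldl_cons, List.foldl_nil]
  rw [rowsweepL _ 0 (by simp)]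
  simp only [List.set, List.getD, List.getElem?_cons_zero, Option.getD_some]
  rw [rowsweepL _ 1 (by simp)]
  simp only [List.set, List.getD, List.getElem?_cons_succ, List.getElem?_cons_zero, Option.getD_some]
  rw [rowsweepL _ 2 (by simp)]
  simp only [List.set, List.getD, List.getElem?_cons_succ, List.getElem?_cons_zero, Option.getD_some]
  rw [rowsweepL _ 3 (by simp)]
  simp [List.set, List.getD]

lemma passR_eq (r0 r1 r2 r3 : List Int) (tm : List (List Int)) :
    passR (r0 :: r1 :: r2 :: r3 :: tm) = pR r0 :: pR r1 :: pR r2 :: pR r3 :: tm := by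
  unfold passR
  simp only [List.foldl_cons, List.foldl_nil]
  rw [rowsweepR _ 0 (by simp)]
  simp only [List.set, List.getD, List.getElem?_cons_zero, Option.getD_some]
  rw [rowsweepR _ 1 (by simp)]
  simp only [List.set, List.getD, List.getElem?_cons_succ, List.getElem?_cons_zero, Option.getD_some]
  rw [rowsweepR _ 2 (by simp)]
  simp only [List.set, List.getD, List.getElem?_cons_succ, List.getElem?_cons_zero, Option.getD_some]
  rw [rowsweepR _ 3 (by simp)]
  simp [List.set, List.getD]

lemma set_zero_self (l : List Int) (i : Nat) (h : i < l.length) (hv : l[i] = 0) :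
    l.set i 0 = l := by
  conv_lhs => rw [← hv]
  exact List.set_getElem_self ..

lemma colsweepU (r0 r1 r2 r3 : List Int) (tm : List (List Int)) (c : Nat)
    (h0 : c < r0.length) (h1 : c < r1.length) (h2 : c < r2.length) (h3 : c < r3.length) :
    shiftUstep (shiftUstep (shiftUstep (r0 :: r1 :: r2 :: r3 :: tm) 0 c) 1 c) 2 c =
      r0.set c ((pL [r0.getD c 0, r1.getD c 0, r2.getD c 0, r3.getD c 0]).getD 0 0) ::
      r1.set c ((pL [r0.getD c 0, r1.getD c 0, r2.getD c 0, r3.getD c 0]).getD 1 0) ::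
      r2.set c ((pL [r0.getD c 0, r1.getD c 0, r2.getD c 0, r3.getD c 0]).getD 2 0) ::
      r3.set c ((pL [r0.getD c 0, r1.getD c 0, r2.getD c 0, r3.getD c 0]).getD 3 0) :: tm := by
  by_cases hx0 : r0.getD c 0 = 0 <;> by_cases hx1 : r1.getD c 0 = 0 <;>
    by_cases hx2 : r2.getD c 0 = 0 <;> by_cases hx3 : r3.getD c 0 = 0 <;>
    simp_all [shiftUstep, gget, gset, pL, stepL, List.range', List.set_set, List.length_set,
      getD_set_self, set_getD_self, set_zero_self]

lemma colsweepD (r0 r1 r2 r3 : List Int) (tm : List (List Int)) (c : Nat)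
    (h0 : c < r0.length) (h1 : c < r1.length) (h2 : c < r2.length) (h3 : c < r3.length) :
    shiftDstep (shiftDstep (shiftDstep (r0 :: r1 :: r2 :: r3 :: tm) 3 c) 2 c) 1 c =
      r0.set c ((pR [r0.getD c 0, r1.getD c 0, r2.getD c 0, r3.getD c 0]).getD 0 0) ::
      r1.set c ((pR [r0.getD c 0, r1.getD c 0, r2.getD c 0, r3.getD c 0]).getD 1 0) ::
      r2.set c ((pR [r0.getD c 0, r1.getD c 0, r2.getD c 0, r3.getD c 0]).getD 2 0) ::
      r3.set c ((pR [r0.getD c 0, r1.getD c 0, r2.getD c 0, r3.getD c 0]).getD 3 0) :: tm := by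
  by_cases hx0 : r0.getD c 0 = 0 <;> by_cases hx1 : r1.getD c 0 = 0 <;>
    by_cases hx2 : r2.getD c 0 = 0 <;> by_cases hx3 : r3.getD c 0 = 0 <;>
    simp_all [shiftDstep, gget, gset, pR, stepR, List.range', List.set_set, List.length_set,
      getD_set_self, set_getD_self, set_zero_self]

lemma passU_eq (e00 e01 e02 e03 e10 e11 e12 e13 e20 e21 e22 e23 e30 e31 e32 e33 : Int)
    (t0 t1 t2 t3 : List Int) (tm : List (List Int)) :
    passU ((e00 :: e01 :: e02 :: e03 :: t0) :: (e10 :: e11 :: e12 :: e13 :: t1) ::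
           (e20 :: e21 :: e22 :: e23 :: t2) :: (e30 :: e31 :: e32 :: e33 :: t3) :: tm) =
      ((pL [e00, e10, e20, e30]).getD 0 0 :: (pL [e01, e11, e21, e31]).getD 0 0 ::
         (pL [e02, e12, e22, e32]).getD 0 0 :: (pL [e03, e13, e23, e33]).getD 0 0 :: t0) ::
      ((pL [e00, e10, e20, e30]).getD 1 0 :: (pL [e01, e11, e21, e31]).getD 1 0 ::
         (pL [e02, e12, e22, e32]).getD 1 0 :: (pL [e03, e13, e23, e33]).getD 1 0 :: t1) ::
      ((pL [e00, e10, e20, e30]).getD 2 0 :: (pL [e01, e11, e21, e31]).getD 2 0 ::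
         (pL [e02, e12, e22, e32]).getD 2 0 :: (pL [e03, e13, e23, e33]).getD 2 0 :: t2) ::
      ((pL [e00, e10, e20, e30]).getD 3 0 :: (pL [e01, e11, e21, e31]).getD 3 0 ::
         (pL [e02, e12, e22, e32]).getD 3 0 :: (pL [e03, e13, e23, e33]).getD 3 0 :: t3) :: tm := by
  unfold passU
  simp only [List.foldl_cons, List.foldl_nil]
  rw [colsweepU _ _ _ _ _ 0 (by simp) (by simp) (by simp) (by simp)]
  simp only [List.getD_cons_zero, List.getD_cons_succ, List.set]
  rw [colsweepU _ _ _ _ _ 1 (by simp) (by simp) (by simp) (by simp)]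
  simp only [List.getD_cons_zero, List.getD_cons_succ, List.set]
  rw [colsweepU _ _ _ _ _ 2 (by simp) (by simp) (by simp) (by simp)]
  simp only [List.getD_cons_zero, List.getD_cons_succ, List.set]
  rw [colsweepU _ _ _ _ _ 3 (by simp) (by simp) (by simp) (by simp)]
  simp only [List.getD_cons_zero, List.getD_cons_succ, List.set]

lemma passD_eq (e00 e01 e02 e03 e10 e11 e12 e13 e20 e21 e22 e23 e30 e31 e32 e33 : Int)
    (t0 t1 t2 t3 : List Int) (tm : List (List Int)) :
    passD ((e00 :: e01 :: e02 :: e03 :: t0) :: (e10 :: e11 :: e12 :: e13 :: t1) ::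
           (e20 :: e21 :: e22 :: e23 :: t2) :: (e30 :: e31 :: e32 :: e33 :: t3) :: tm) =
      ((pR [e00, e10, e20, e30]).getD 0 0 :: (pR [e01, e11, e21, e31]).getD 0 0 ::
         (pR [e02, e12, e22, e32]).getD 0 0 :: (pR [e03, e13, e23, e33]).getD 0 0 :: t0) ::
      ((pR [e00, e10, e20, e30]).getD 1 0 :: (pR [e01, e11, e21, e31]).getD 1 0 ::
         (pR [e02, e12, e22, e32]).getD 1 0 :: (pR [e03, e13, e23, e33]).getD 1 0 :: t1) ::
      ((pR [e00, e10, e20, e30]).getD 2 0 :: (pR [e01, e11, e21, e31]).getD 2 0 ::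
         (pR [e02, e12, e22, e32]).getD 2 0 :: (pR [e03, e13, e23, e33]).getD 2 0 :: t2) ::
      ((pR [e00, e10, e20, e30]).getD 3 0 :: (pR [e01, e11, e21, e31]).getD 3 0 ::
         (pR [e02, e12, e22, e32]).getD 3 0 :: (pR [e03, e13, e23, e33]).getD 3 0 :: t3) :: tm := by
  unfold passD
  simp only [List.foldl_cons, List.foldl_nil]
  rw [colsweepD _ _ _ _ _ 0 (by simp) (by simp) (by simp) (by simp)]
  simp only [List.getD_cons_zero, List.getD_cons_succ, List.set]
  rw [colsweepD _ _ _ _ _ 1 (by simp) (by simp) (by simp) (by simp)]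
  simp only [List.getD_cons_zero, List.getD_cons_succ, List.set]
  rw [colsweepD _ _ _ _ _ 2 (by simp) (by simp) (by simp) (by simp)]
  simp only [List.getD_cons_zero, List.getD_cons_succ, List.set]
  rw [colsweepD _ _ _ _ _ 3 (by simp) (by simp) (by simp) (by simp)]
  simp only [List.getD_cons_zero, List.getD_cons_succ, List.set]

lemma pLpL (x0 x1 x2 x3 : Int) (t : List Int) :
    pL (pL (x0 :: x1 :: x2 :: x3 :: t)) =
      (pyCompact [x0, x1, x2, x3] ++
        List.replicate (4 - (pyCompact [x0, x1, x2, x3]).length) 0) ++ t := by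
  by_cases hx0 : x0 = 0 <;> by_cases hx1 : x1 = 0 <;>
    by_cases hx2 : x2 = 0 <;> by_cases hx3 : x3 = 0 <;>
    simp_all [pL, stepL, pyCompact, List.range', List.set, List.replicate]

lemma pRpR (x0 x1 x2 x3 : Int) (t : List Int) :
    pR (pR (x0 :: x1 :: x2 :: x3 :: t)) =
      (List.replicate (4 - (pyCompact [x0, x1, x2, x3]).length) 0 ++
        pyCompact [x0, x1, x2, x3]) ++ t := by
  by_cases hx0 : x0 = 0 <;> by_cases hx1 : x1 = 0 <;>
    by_cases hx2 : x2 = 0 <;> by_cases hx3 : x3 = 0 <;>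
    simp_all [pR, stepR, pyCompact, List.range', List.set, List.replicate]

lemma iteAddOne (c : Prop) [Decidable c] (x : Int) :
    (if c then x + 1 else x) = x + (if c then 1 else 0) := by split_ifs <;> ring

lemma ite_eq_swap (x y : Int) : (if x = y then (1 : Int) else 0) = (if y = x then 1 else 0) := by
  by_cases h : x = y
  · simp [h]
  · rw [if_neg h, if_neg (fun h' => h h'.symm)]

lemma countL_eq (g : List (List Int)) :
    countL g = countPairs [gget g 0 0, gget g 0 1, gget g 0 2, gget g 0 3]
      + countPairs [gget g 1 0, gget g 1 1, gget g 1 2, gget g 1 3]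
      + countPairs [gget g 2 0, gget g 2 1, gget g 2 2, gget g 2 3]
      + countPairs [gget g 3 0, gget g 3 1, gget g 3 2, gget g 3 3] := by
  simp only [countL, countPairs, List.foldl_cons, List.foldl_nil, List.getD_cons_zero,
    List.getD_cons_succ, Nat.reduceAdd, iteAddOne]
  ring

lemma countR_eq (g : List (List Int)) :
    countR g = countPairs [gget g 0 0, gget g 0 1, gget g 0 2, gget g 0 3]
      + countPairs [gget g 1 0, gget g 1 1, gget g 1 2, gget g 1 3]
      + countPairs [gget g 2 0, gget g 2 1, gget g 2 2, gget g 2 3]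
      + countPairs [gget g 3 0, gget g 3 1, gget g 3 2, gget g 3 3] := by
  simp only [countR, countPairs, List.foldl_cons, List.foldl_nil, List.getD_cons_zero,
    List.getD_cons_succ, Nat.reduceAdd, Nat.reduceSub, iteAddOne, ite_eq_swap]
  ring

lemma countU_eq (g : List (List Int)) :
    countU g = countPairs [gget g 0 0, gget g 1 0, gget g 2 0, gget g 3 0]
      + countPairs [gget g 0 1, gget g 1 1, gget g 2 1, gget g 3 1]
      + countPairs [gget g 0 2, gget g 1 2, gget g 2 2, gget g 3 2]
      + countPairs [gget g 0 3, gget g 1 3, gget g 2 3, gget g 3 3] := by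
  simp only [countU, countPairs, List.foldl_cons, List.foldl_nil, List.getD_cons_zero,
    List.getD_cons_succ, Nat.reduceAdd, iteAddOne]
  ring

lemma countD_eq (g : List (List Int)) :
    countD g = countPairs [gget g 0 0, gget g 1 0, gget g 2 0, gget g 3 0]
      + countPairs [gget g 0 1, gget g 1 1, gget g 2 1, gget g 3 1]
      + countPairs [gget g 0 2, gget g 1 2, gget g 2 2, gget g 3 2]
      + countPairs [gget g 0 3, gget g 1 3, gget g 2 3, gget g 3 3] := by
  simp only [countD, countPairs, List.foldl_cons, List.foldl_nil, List.getD_cons_zero,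
    List.getD_cons_succ, Nat.reduceAdd, Nat.reduceSub, iteAddOne, ite_eq_swap]
  ring

lemma compact_len_le (x0 x1 x2 x3 : Int) : (pyCompact [x0, x1, x2, x3]).length ≤ 4 := by
  simpa [pyCompact] using List.length_filter_le (fun v => v != 0) [x0, x1, x2, x3]

lemma padR_len4 (x0 x1 x2 x3 : Int) :
    (pyCompact [x0, x1, x2, x3] ++
      List.replicate (4 - (pyCompact [x0, x1, x2, x3]).length) (0 : Int)).length = 4 := by
  have := compact_len_le x0 x1 x2 x3
  simp; omega

lemma padL_len4 (x0 x1 x2 x3 : Int) :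
    (List.replicate (4 - (pyCompact [x0, x1, x2, x3]).length) (0 : Int) ++
      pyCompact [x0, x1, x2, x3]).length = 4 := by
  have := compact_len_le x0 x1 x2 x3
  simp; omega

lemma compact_padR (l : List Int) (k : Nat) :
    pyCompact (pyCompact l ++ List.replicate k 0) = pyCompact l := by
  induction k with
  | zero => simp [pyCompact, List.filter_filter]
  | succ k ih =>
      simp only [List.replicate_succ'] at *
      simpa [pyCompact, List.filter_append] using ih

lemma exists_four_tail (l : List Int) (h : 4 ≤ l.length) : ∃ a b c d t, l = a :: b :: c :: d :: t := by
  rcases l with _ | ⟨a, _ | ⟨b, _ | ⟨c, _ | ⟨d, t⟩⟩⟩⟩ <;>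
    first
    | exact ⟨_, _, _, _, _, rfl⟩
    | simp at h

lemma pL_len4 (a b c d : Int) : (pL [a, b, c, d]).length = 4 := by rw [pL_length]; rfl

lemma pR_len4 (a b c d : Int) : (pR [a, b, c, d]).length = 4 := by rw [pR_length]; rfl

-- ===== VERDICT (by name: the statement is the Claim_ definition above) =====
theorem compteur_des_additions_possibles_spec : Claim_equal_compteur_des_additions_possibles := by
  intro m hDom hPre
  unfold Spec_compteur_des_additions_possibles
  obtain ⟨hlen, hrows⟩ := hPre
  obtain ⟨r0, r1, r2, r3, tm, rfl⟩ : ∃ r0 r1 r2 r3 tm, m = r0 :: r1 :: r2 :: r3 :: tm := by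
    rcases m with _ | ⟨r0, _ | ⟨r1, _ | ⟨r2, _ | ⟨r3, tm⟩⟩⟩⟩ <;>
      first
      | exact ⟨_, _, _, _, _, rfl⟩
      | simp at hlen
  obtain ⟨x00, x01, x02, x03, t0, rfl⟩ := exists_four_tail r0 (hrows r0 (by simp))
  obtain ⟨x10, x11, x12, x13, t1, rfl⟩ := exists_four_tail r1 (hrows r1 (by simp))
  obtain ⟨x20, x21, x22, x23, t2, rfl⟩ := exists_four_tail r2 (hrows r2 (by simp))
  obtain ⟨x30, x31, x32, x33, t3, rfl⟩ := exists_four_tail r3 (hrows r3 (by simp))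
  simp only [compteur_des_additions_possibles, compteur_des_additions_possibles_alt]
  rw [passL_eq, passL_eq, pLpL, pLpL, pLpL, pLpL]
  simp only [List.foldl_cons, List.foldl_nil, List.getD_cons_zero, List.getD_cons_succ]
  obtain ⟨u00, u01, u02, u03, hu0⟩ := exists_four _ (padR_len4 x00 x01 x02 x03)
  obtain ⟨u10, u11, u12, u13, hu1⟩ := exists_four _ (padR_len4 x10 x11 x12 x13)
  obtain ⟨u20, u21, u22, u23, hu2⟩ := exists_four _ (padR_len4 x20 x21 x22 x23)
  obtain ⟨u30, u31, u32, u33, hu3⟩ := exists_four _ (padR_len4 x30 x31 x32 x33)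
  rw [hu0, hu1, hu2, hu3]
  simp only [List.cons_append, List.nil_append]
  rw [countL_eq, passR_eq, passR_eq, pRpR, pRpR, pRpR, pRpR]
  simp only [gget, List.getD_cons_zero, List.getD_cons_succ]
  rw [← hu0, ← hu1, ← hu2, ← hu3]
  simp only [compact_padR]
  obtain ⟨v00, v01, v02, v03, hv0⟩ := exists_four _ (padL_len4 x00 x01 x02 x03)
  obtain ⟨v10, v11, v12, v13, hv1⟩ := exists_four _ (padL_len4 x10 x11 x12 x13)
  obtain ⟨v20, v21, v22, v23, hv2⟩ := exists_four _ (padL_len4 x20 x21 x22 x23)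
  obtain ⟨v30, v31, v32, v33, hv3⟩ := exists_four _ (padL_len4 x30 x31 x32 x33)
  rw [hv0, hv1, hv2, hv3]
  simp only [List.cons_append, List.nil_append]
  rw [countR_eq]
  simp only [gget, List.getD_cons_zero, List.getD_cons_succ, List.map_cons, List.map_nil]
  rw [passU_eq, passU_eq]
  rw [four_getD _ (pL_len4 v00 v10 v20 v30), four_getD _ (pL_len4 v01 v11 v21 v31),
    four_getD _ (pL_len4 v02 v12 v22 v32), four_getD _ (pL_len4 v03 v13 v23 v33)]
  rw [pLpL v00 v10 v20 v30 [], pLpL v01 v11 v21 v31 [], pLpL v02 v12 v22 v32 [],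
    pLpL v03 v13 v23 v33 []]
  simp only [List.append_nil]
  obtain ⟨w00, w10, w20, w30, hw0⟩ := exists_four _ (padR_len4 v00 v10 v20 v30)
  obtain ⟨w01, w11, w21, w31, hw1⟩ := exists_four _ (padR_len4 v01 v11 v21 v31)
  obtain ⟨w02, w12, w22, w32, hw2⟩ := exists_four _ (padR_len4 v02 v12 v22 v32)
  obtain ⟨w03, w13, w23, w33, hw3⟩ := exists_four _ (padR_len4 v03 v13 v23 v33)
  rw [hw0, hw1, hw2, hw3]
  simp only [List.getD_cons_zero, List.getD_cons_succ]
  rw [countU_eq]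
  simp only [gget, List.getD_cons_zero, List.getD_cons_succ]
  rw [passD_eq, passD_eq]
  rw [four_getD _ (pR_len4 w00 w10 w20 w30), four_getD _ (pR_len4 w01 w11 w21 w31),
    four_getD _ (pR_len4 w02 w12 w22 w32), four_getD _ (pR_len4 w03 w13 w23 w33)]
  rw [pRpR w00 w10 w20 w30 [], pRpR w01 w11 w21 w31 [], pRpR w02 w12 w22 w32 [],
    pRpR w03 w13 w23 w33 []]
  simp only [List.append_nil]
  rw [← hw0, ← hw1, ← hw2, ← hw3]
  simp only [compact_padR]
  rw [countD_eq]
  simp only [gget, List.getD_cons_zero, List.getD_cons_succ]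
  rw [four_getD _ (padL_len4 v00 v10 v20 v30), four_getD _ (padL_len4 v01 v11 v21 v31),
    four_getD _ (padL_len4 v02 v12 v22 v32), four_getD _ (padL_len4 v03 v13 v23 v33)]
  ring
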